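-- pv_equiv track=rewrite | github.com/NobilisManius/sdf_parser | funcs.py | define_description
-- ===== SOURCE A (Python) =====
-- def define_description(parsed_file):
--     """Find the description of delayfile and return it as tuple."""
--     temp = []
--
--     for line in parsed_file:
--         if "(CELL" in line:
--             break
--         elif "(DELAYFILE" in line:
--             continue
--         else:
--             temp.append(line.translate({ord(i): None for i in ')'}))
--
--     return tuple(temp)
-- ===== SOURCE B (Python) =====
-- def define_description(parsed_file):
--     """Find the description of delayfile and return it as tuple."""
--     stop = next((i for i, line in enumerate(parsed_file) if "(CELL" in line),
--                 len(parsed_file))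
--     return tuple("".join(c for c in line if c != ")")
--                  for line in parsed_file[:stop]
--                  if "(DELAYFILE" not in line)
-- ===== Notes on version B (the rewrite author's own statement) =====
-- stated objective: simpler
-- what changed: Replaces the fused break/continue/append loop with a two-stage pipeline: first locate the index of the first '(CELL' line, then a single filter-and-strip comprehension over that prefix.
import Mathlib
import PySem

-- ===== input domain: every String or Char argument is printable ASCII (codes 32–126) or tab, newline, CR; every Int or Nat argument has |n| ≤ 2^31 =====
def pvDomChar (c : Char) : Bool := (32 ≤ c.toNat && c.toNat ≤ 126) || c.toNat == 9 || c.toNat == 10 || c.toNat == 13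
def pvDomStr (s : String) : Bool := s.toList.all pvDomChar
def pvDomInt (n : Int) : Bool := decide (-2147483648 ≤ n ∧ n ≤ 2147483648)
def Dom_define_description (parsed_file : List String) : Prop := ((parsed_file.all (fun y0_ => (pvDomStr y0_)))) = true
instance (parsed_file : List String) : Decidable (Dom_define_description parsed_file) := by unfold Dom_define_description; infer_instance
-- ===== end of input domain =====

-- B replaces A's fused break/continue/append loop by a two-stage pipeline (find the
-- stop index, then filter-and-strip the prefix); objective: simpler decomposition.


-- ===== PORT A =====
-- line.translate({ord(')'): None}) deletes every ')' — exact as a character filter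
def ddStrip (line : String) : String :=
  String.ofList (line.toList.filter (fun c => !(c == ')')))

-- the for-loop with break/continue and the accumulator `temp`
def ddLoopA : List String → List String → List String
  | [], temp => temp
  | line :: rest, temp =>
    if PySem.Str.isIn "(CELL" line then temp
    else if PySem.Str.isIn "(DELAYFILE" line then ddLoopA rest temp
    else ddLoopA rest (temp ++ [ddStrip line])

def define_description (parsed_file : List String) : List String :=
  ddLoopA parsed_file []

-- ===== PORT B =====
-- next((i for i, line in enumerate(parsed_file) if "(CELL" in line), len(parsed_file))
def ddStop : List String → Nat
  | [] => 0
  | line :: rest => if PySem.Str.isIn "(CELL" line then 0 else ddStop rest + 1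

def define_description_alt (parsed_file : List String) : List String :=
  ((PySem.List.slice parsed_file none (some (ddStop parsed_file : Int))).filter
      (fun line => !PySem.Str.isIn "(DELAYFILE" line)).map
    (fun line => String.ofList (line.toList.filter (fun c => !(c == ')'))))

-- ===== PRECONDITION & SPEC =====
def Spec_define_description (parsed_file : List String) (out : List String) : Prop := out = define_description_alt parsed_file
instance (parsed_file : List String) (out : List String) : Decidable (Spec_define_description parsed_file out) := by unfold Spec_define_description; infer_instance

-- ===== CLAIM (what is proved, stated in full; the proofs are below) =====
def Claim_equal_define_description : Prop := ∀ (parsed_file : List String), Dom_define_description parsed_file → Spec_define_description parsed_file (define_description parsed_file)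

-- ===== LEMMAS AND PROOFS =====

-- proof-only abbreviations for the three per-line tests/transform
def ddP (l : String) : Bool := !PySem.Chars.isIn ['(', 'C', 'E', 'L', 'L'] l.toList
def ddQ (l : String) : Bool := !PySem.Chars.isIn ['(', 'D', 'E', 'L', 'A', 'Y', 'F', 'I', 'L', 'E'] l.toList
def ddF (l : String) : String := String.ofList (l.toList.filter (fun c => !(c == ')')))

theorem take_ddStop (ls : List String) : ls.take (ddStop ls) = ls.takeWhile ddP := by
  induction ls with
  | nil => rfl
  | cons line rest ih =>
    by_cases hc : PySem.Chars.isIn ['(', 'C', 'E', 'L', 'L'] line.toList = true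
    · simp [ddStop, hc, ddP]
    · simp [ddStop, hc, ddP, ih]

theorem alt_eq (ls : List String) :
    define_description_alt ls = ((ls.takeWhile ddP).filter ddQ).map ddF := by
  rw [define_description_alt, PySem.List.slice_to_natCast, take_ddStop]
  unfold ddQ ddF
  rfl

theorem ddLoopA_eq (ls temp : List String) :
    ddLoopA ls temp = temp ++ ((ls.takeWhile ddP).filter ddQ).map ddF := by
  induction ls generalizing temp with
  | nil => simp [ddLoopA]
  | cons line rest ih =>
    by_cases hc : PySem.Chars.isIn ['(', 'C', 'E', 'L', 'L'] line.toList = true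
    · simp [ddLoopA, hc, ddP]
    · by_cases hd : PySem.Chars.isIn ['(', 'D', 'E', 'L', 'A', 'Y', 'F', 'I', 'L', 'E'] line.toList = true
      · simp [ddLoopA, hc, hd, ddP, ddQ, ih]
      · simp [ddLoopA, hc, hd, ddP, ddQ, ddF, ddStrip, ih]

-- ===== VERDICT (by name: the statement is the Claim_ definition above) =====
theorem define_description_spec : Claim_equal_define_description := by
  intro parsed_file _
  unfold Spec_define_description define_description
  rw [alt_eq]
  simpa using ddLoopA_eq parsed_file []
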